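-- pv_equiv track=rewrite | github.com/asa-degroff/umbra | bsky_utils.py | compute_tree_prefixes
-- ===== SOURCE A (Python) =====
-- from typing import Optional, Dict, Any, List
--
-- def compute_tree_prefixes(posts: List[Dict]) -> Dict[str, str]:
--     """
--     Compute tree-style prefixes based on parent relationships.
--
--     Args:
--         posts: List of post dicts, each with 'uri' and 'parent_uri' keys
--
--     Returns:
--         Dict mapping uri -> prefix string (e.g., "├─ ", "│  └─ ")
--     """
--     if not posts:
--         return {}
--
--     uri_to_post = {p.get('uri'): p for p in posts if p.get('uri')}
--     children_map: Dict[str, List[str]] = {}  # parent_uri -> [child_uris]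
--     root_uris: List[str] = []
--
--     for post in posts:
--         uri = post.get('uri')
--         if not uri:
--             continue
--         parent_uri = post.get('parent_uri')
--         if not parent_uri or parent_uri not in uri_to_post:
--             root_uris.append(uri)
--         else:
--             children_map.setdefault(parent_uri, []).append(uri)
--
--     prefixes: Dict[str, str] = {}
--     visited: set = set()
--
--     def compute_recursive(uri: str, ancestors_last: List[bool]):
--         if uri in visited:
--             return
--         visited.add(uri)
--
--         prefix_parts = []
--         for is_last in ancestors_last[:-1]:
--             prefix_parts.append("   " if is_last else "│  ")
--         if ancestors_last:
--             prefix_parts.append("└─ " if ancestors_last[-1] else "├─ ")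
--         prefixes[uri] = "".join(prefix_parts)
--
--         children = children_map.get(uri, [])
--         for i, child_uri in enumerate(children):
--             compute_recursive(child_uri, ancestors_last + [i == len(children) - 1])
--
--     for i, root_uri in enumerate(root_uris):
--         if len(root_uris) == 1:
--             prefixes[root_uri] = ""
--             children = children_map.get(root_uri, [])
--             for j, child_uri in enumerate(children):
--                 compute_recursive(child_uri, [j == len(children) - 1])
--         else:
--             compute_recursive(root_uri, [i == len(root_uris) - 1])
--
--     return prefixes
-- ===== SOURCE B (Python) =====
-- from typing import Dict, List
--
-- def compute_tree_prefixes(posts: List[Dict]) -> Dict[str, str]: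
--     """Iterative DFS with an explicit stack instead of recursion; each stack
--     entry carries its ready-made indent string, so no ancestor list is rebuilt."""
--     if not posts:
--         return {}
--
--     uri_to_post = {p.get('uri'): p for p in posts if p.get('uri')}
--     children_map: Dict[str, List[str]] = {}
--     root_uris: List[str] = []
--
--     for post in posts:
--         uri = post.get('uri')
--         if not uri:
--             continue
--         parent_uri = post.get('parent_uri')
--         if not parent_uri or parent_uri not in uri_to_post:
--             root_uris.append(uri)
--         else:
--             children_map.setdefault(parent_uri, []).append(uri)
--
--     prefixes: Dict[str, str] = {}
--     visited: set = set()
--     stack: List[tuple] = []  # (uri, indent, is_last); top = end of list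
--
--     def push_children(parent_uri: str, indent: str) -> None:
--         children = children_map.get(parent_uri, [])
--         n = len(children)
--         for j in range(n - 1, -1, -1):
--             stack.append((children[j], indent, j == n - 1))
--
--     if len(root_uris) == 1:
--         root = root_uris[0]
--         prefixes[root] = ""
--         push_children(root, "")
--     else:
--         n = len(root_uris)
--         for i in range(n - 1, -1, -1):
--             stack.append((root_uris[i], "", i == n - 1))
--
--     while stack:
--         uri, indent, is_last = stack.pop()
--         if uri in visited:
--             continue
--         visited.add(uri)
--         prefixes[uri] = indent + ("└─ " if is_last else "├─ ")
--         push_children(uri, indent + ("   " if is_last else "│  "))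
--
--     return prefixes
-- ===== Notes on version B (the rewrite author's own statement) =====
-- stated objective: alternative
-- what changed: The recursive helper (which rebuilds the whole prefix from the ancestors_last list at every node) is replaced by an explicit iterative DFS with a stack of (uri, indent, is_last) entries that carry an incrementally built indent string, pushing children in reverse so pops reproduce the original preorder.
import Mathlib
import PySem

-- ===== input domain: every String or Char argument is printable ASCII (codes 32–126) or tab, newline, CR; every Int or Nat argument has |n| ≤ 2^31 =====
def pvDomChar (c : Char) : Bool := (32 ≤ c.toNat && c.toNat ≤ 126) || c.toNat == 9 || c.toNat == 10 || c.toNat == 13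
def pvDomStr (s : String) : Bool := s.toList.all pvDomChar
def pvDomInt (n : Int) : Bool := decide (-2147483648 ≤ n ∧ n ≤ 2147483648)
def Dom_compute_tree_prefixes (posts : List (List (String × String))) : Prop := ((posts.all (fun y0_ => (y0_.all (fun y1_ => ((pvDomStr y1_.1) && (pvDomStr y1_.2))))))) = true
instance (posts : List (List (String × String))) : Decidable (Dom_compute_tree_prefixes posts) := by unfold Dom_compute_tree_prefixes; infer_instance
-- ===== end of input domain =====

-- B replaces A's recursive helper (which rebuilds the whole prefix from the ancestors list at
-- every node) with an explicit iterative DFS stack whose entries carry a ready-made indent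
-- string; the preprocessing (uri_to_post / children_map / root_uris) is identical in both
-- Pythons and therefore shared between the two ports below.

-- ===== PORT A =====
-- shared preprocessing helpers (textually identical in Source A and Source B)
-- p.get(k) on the dict the caller builds from the association list
def pvGet (p : List (String × String)) (k : String) : Option String :=
  (PySem.Dict.ofList p).get? k

-- Python truthiness filter for an Optional[str]: None and "" are falsy
def pvTruthy (o : Option String) : Option String :=
  match o with
  | none => none
  | some s => if s = "" then none else some s

-- {p.get('uri'): p for p in posts if p.get('uri')}
def pvUriToPost (posts : List (List (String × String))) : PySem.Dict String (List (String × String)) :=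
  posts.foldl (fun d p =>
    match pvTruthy (pvGet p "uri") with
    | some u => d.insert u p
    | none => d) PySem.Dict.empty

-- the loop that fills children_map (setdefault(...).append) and root_uris
def pvBuild (posts : List (List (String × String)))
    (utp : PySem.Dict String (List (String × String))) :
    PySem.Dict String (List String) × List String :=
  posts.foldl (fun acc p =>
    match pvTruthy (pvGet p "uri") with
    | none => acc
    | some u =>
      match pvTruthy (pvGet p "parent_uri") with
      | none => (acc.1, acc.2 ++ [u])
      | some pu =>
        if utp.contains pu then (acc.1.modify pu [] (· ++ [u]), acc.2)
        else (acc.1, acc.2 ++ [u])) (PySem.Dict.empty, [])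

-- state of the traversal: (prefixes dict, visited set)
abbrev PvSt := PySem.Dict String String × PySem.Set String

-- the prefix A builds from the ancestors_last list ("".join(prefix_parts))
def pvPrefixOfAnc (anc : List Bool) : String :=
  String.join ((anc.dropLast.map (fun b => if b then "   " else "│  ")) ++
    (match anc.getLast? with
     | none => []
     | some b => [if b then "└─ " else "├─ "]))

-- compute_recursive; the Nat argument bounds recursion DEPTH (the Python recursion's depth is
-- at most the number of distinct uris, so the fuel posts.length + 1 used below never runs out)
def pvRecA (cm : PySem.Dict String (List String)) : Nat → PvSt → String → List Bool → PvSt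
  | 0, st, _, _ => st
  | fuel+1, st, uri, anc =>
    if PySem.Set.contains st.2 uri then st
    else
      let st1 : PvSt := (st.1.insert uri (pvPrefixOfAnc anc), PySem.Set.add st.2 uri)
      let children := cm.getD uri []
      (PySem.List.enumerate children).foldl
        (fun st2 ic => pvRecA cm fuel st2 ic.2 (anc ++ [decide (ic.1 = (children.length : Int) - 1)])) st1

def compute_tree_prefixes (posts : List (List (String × String))) : List (String × String) :=
  if posts.isEmpty then []
  else
    let utp := pvUriToPost posts
    let cmroots := pvBuild posts utp
    let cm := cmroots.1
    let roots := cmroots.2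
    let fuel := posts.length + 1
    let st := (PySem.List.enumerate roots).foldl (fun (st : PvSt) ir =>
      if roots.length = 1 then
        let st' : PvSt := (st.1.insert ir.2 "", st.2)
        let children := cm.getD ir.2 []
        (PySem.List.enumerate children).foldl
          (fun st2 jc => pvRecA cm fuel st2 jc.2 [decide (jc.1 = (children.length : Int) - 1)]) st'
      else pvRecA cm fuel st ir.2 [decide (ir.1 = (roots.length : Int) - 1)])
      ((PySem.Dict.empty, PySem.Set.empty) : PvSt)
    st.1.items

-- ===== PORT B =====
-- push_children: the entries Source B pushes for the children of u (Source B pushes them in reverse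
-- onto a stack popped from the end; with the head of the list as the top of the stack that is
-- prepending them in order, so the helper returns them in order)
def pvPushB (cm : PySem.Dict String (List String)) (u : String) (ind : String) :
    List (String × String × Bool) :=
  let children := cm.getD u []
  (PySem.List.enumerate children).map
    (fun jc => (jc.2, ind, decide (jc.1 = (children.length : Int) - 1)))

-- the while-stack loop; the Nat argument bounds the number of pops (total pushes are at most
-- 2 * posts.length, so the fuel used below never runs out)
def pvRunB (cm : PySem.Dict String (List String)) : Nat → PvSt → List (String × String × Bool) → PvSt
  | _, st, [] => st
  | 0, st, _ :: _ => st
  | fuel+1, st, (uri, ind, isLast) :: rest =>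
    if PySem.Set.contains st.2 uri then pvRunB cm fuel st rest
    else
      let st1 : PvSt := (st.1.insert uri (ind ++ (if isLast then "└─ " else "├─ ")), PySem.Set.add st.2 uri)
      pvRunB cm fuel st1 (pvPushB cm uri (ind ++ (if isLast then "   " else "│  ")) ++ rest)

def compute_tree_prefixes_alt (posts : List (List (String × String))) : List (String × String) :=
  if posts.isEmpty then []
  else
    let utp := pvUriToPost posts
    let cmroots := pvBuild posts utp
    let cm := cmroots.1
    let roots := cmroots.2
    let fuel := 2 * posts.length + 1
    let init : PvSt × List (String × String × Bool) :=
      if roots.length = 1 then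
        ((PySem.Dict.empty.insert roots.head! "", PySem.Set.empty), pvPushB cm roots.head! "")
      else
        ((PySem.Dict.empty, PySem.Set.empty),
         (PySem.List.enumerate roots).map (fun ir => (ir.2, "", decide (ir.1 = (roots.length : Int) - 1))))
    (pvRunB cm fuel init.1 init.2).1.items

-- ===== PRECONDITION & SPEC =====
def Spec_compute_tree_prefixes (posts : List (List (String × String))) (out : List (String × String)) : Prop := out = compute_tree_prefixes_alt posts
instance (posts : List (List (String × String))) (out : List (String × String)) : Decidable (Spec_compute_tree_prefixes posts out) := by unfold Spec_compute_tree_prefixes; infer_instance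

-- ===== CLAIM (what is proved, stated in full; the proofs are below) =====
def Claim_equal_compute_tree_prefixes : Prop := ∀ (posts : List (List (String × String))), Dom_compute_tree_prefixes posts → Spec_compute_tree_prefixes posts (compute_tree_prefixes posts)

-- ===== LEMMAS AND PROOFS =====

-- the indent string accumulated for an ancestors_last list
def pvRen (l : List Bool) : String :=
  String.join (l.map (fun b => if b then "   " else "│  "))

-- the stack entry B uses for the call A makes with (uri, anc)
def pvItem (c : String × List Bool) : String × String × Bool :=
  (c.1, pvRen c.2.dropLast, c.2.getLast!)

-- folding A's recursion over a list of pending calls, each with its own fuel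
def pvFoldA (cm : PySem.Dict String (List String)) (st : PvSt)
    (fcalls : List (Nat × String × List Bool)) : PvSt :=
  fcalls.foldl (fun st fc => pvRecA cm fc.1 st fc.2.1 fc.2.2) st

-- visited set as a Finset
def pvVisF (st : PvSt) : Finset String := st.2.toFinset

-- potential: one unit per future pop of the B machine
def pvPhi (cm : PySem.Dict String (List String)) (U : Finset String) (st : PvSt)
    (stack : List (String × String × Bool)) : Nat :=
  stack.length + (U \ pvVisF st).sum (fun u => (cm.getD u []).length)

lemma pvJoin_concat (l : List String) (s : String) :
    String.join (l ++ [s]) = String.join l ++ s := by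
  simp [String.join, List.foldl_append]

lemma pvRen_concat (l : List Bool) (b : Bool) :
    pvRen (l ++ [b]) = pvRen l ++ (if b then "   " else "│  ") := by
  simp [pvRen, pvJoin_concat]

lemma pvPrefix_concat (l : List Bool) (b : Bool) :
    pvPrefixOfAnc (l ++ [b]) = pvRen l ++ (if b then "└─ " else "├─ ") := by
  simp [pvPrefixOfAnc, pvRen, pvJoin_concat]

lemma pvItem_concat (u : String) (l : List Bool) (b : Bool) :
    pvItem (u, l ++ [b]) = (u, pvRen l, b) := by
  simp [pvItem]

lemma pvPrefix_eq (anc : List Bool) (h : anc ≠ []) :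
    pvPrefixOfAnc anc = pvRen anc.dropLast ++ (if anc.getLast! then "└─ " else "├─ ") := by
  conv_lhs => rw [← List.dropLast_append_getLast h]
  rw [pvPrefix_concat, List.getLast!_eq_getLast?_getD, List.getLast?_eq_some_getLast h]
  rfl

lemma pvRen_eq (anc : List Bool) (h : anc ≠ []) :
    pvRen anc = pvRen anc.dropLast ++ (if anc.getLast! then "   " else "│  ") := by
  conv_lhs => rw [← List.dropLast_append_getLast h]
  rw [pvRen_concat, List.getLast!_eq_getLast?_getD, List.getLast?_eq_some_getLast h]
  rfl

lemma pvMem_enumerate {α : Type} {ic : Int × α} {xs : List α} {s : Int}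
    (h : ic ∈ PySem.List.enumerate xs s) : ic.2 ∈ xs := by
  have := PySem.List.map_snd_enumerate xs s
  rw [← this]
  exact List.mem_map_of_mem h

lemma pvRunB_nil (cm : PySem.Dict String (List String)) (f : Nat) (st : PvSt) :
    pvRunB cm f st [] = st := by cases f <;> rfl

lemma pvRunB_succ (cm : PySem.Dict String (List String)) (f : Nat) (st : PvSt)
    (u ind : String) (b : Bool) (rest : List (String × String × Bool)) :
    pvRunB cm (f+1) st ((u, ind, b) :: rest)
      = if PySem.Set.contains st.2 u then pvRunB cm f st rest
        else pvRunB cm f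
          (st.1.insert u (ind ++ (if b then "└─ " else "├─ ")), PySem.Set.add st.2 u)
          (pvPushB cm u (ind ++ (if b then "   " else "│  ")) ++ rest) := rfl

lemma pvRecA_succ (cm : PySem.Dict String (List String)) (f : Nat) (st : PvSt)
    (uri : String) (anc : List Bool) :
    pvRecA cm (f+1) st uri anc
      = if PySem.Set.contains st.2 uri then st
        else
          (PySem.List.enumerate (cm.getD uri [])).foldl
            (fun st2 ic => pvRecA cm f st2 ic.2
              (anc ++ [decide (ic.1 = ((cm.getD uri []).length : Int) - 1)]))
            (st.1.insert uri (pvPrefixOfAnc anc), PySem.Set.add st.2 uri) := rfl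

lemma pvFoldA_cons (cm : PySem.Dict String (List String)) (st : PvSt)
    (fc : Nat × String × List Bool) (more : List (Nat × String × List Bool)) :
    pvFoldA cm st (fc :: more) = pvFoldA cm (pvRecA cm fc.1 st fc.2.1 fc.2.2) more := rfl

lemma pvFoldA_append (cm : PySem.Dict String (List String)) (st : PvSt)
    (l1 l2 : List (Nat × String × List Bool)) :
    pvFoldA cm st (l1 ++ l2) = pvFoldA cm (pvFoldA cm st l1) l2 :=
  List.foldl_append

lemma pvContains_iff (s : PySem.Set String) (x : String) :
    PySem.Set.contains s x = true ↔ x ∈ s := by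
  simp [PySem.Set.contains]

-- the main simulation: running B's stack machine on the stack entries of a list of pending
-- A-calls performs exactly those calls
lemma pvSIM (cm : PySem.Dict String (List String)) (U : Finset String)
    (HU : ∀ k u, u ∈ cm.getD k [] → u ∈ U) :
    ∀ (c L : Nat) (fcalls : List (Nat × String × List Bool)) (st : PvSt)
      (rest : List (String × String × Bool)) (fB : Nat),
      (U \ pvVisF st).card ≤ c → fcalls.length ≤ L →
      (∀ fc ∈ fcalls, fc.2.1 ∈ U ∧ fc.2.2 ≠ [] ∧ (U \ pvVisF st).card + 1 ≤ fc.1) →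
      pvPhi cm U st (fcalls.map (fun fc => pvItem fc.2) ++ rest) ≤ fB →
      ∃ fB', pvRunB cm fB st (fcalls.map (fun fc => pvItem fc.2) ++ rest)
               = pvRunB cm fB' (pvFoldA cm st fcalls) rest
             ∧ pvPhi cm U (pvFoldA cm st fcalls) rest ≤ fB' := by
  intro c
  induction c using Nat.strong_induction_on with
  | _ c ihc =>
    intro L
    induction L using Nat.strong_induction_on with
    | _ L ihL =>
      intro fcalls st rest fB hc hL hinv hphi
      match fcalls with
      | [] => exact ⟨fB, rfl, by simpa using hphi⟩
      | (fA, u, anc) :: more =>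
        obtain ⟨huU, hanc, hfuel⟩ := hinv _ (List.mem_cons_self)
        obtain ⟨fA', rfl⟩ : ∃ fA', fA = fA' + 1 := ⟨fA - 1, by omega⟩
        obtain ⟨g, rfl⟩ : ∃ g, fB = g + 1 := by
          refine ⟨fB - 1, ?_⟩
          unfold pvPhi at hphi; simp at hphi; omega
        have hitem : pvItem (u, anc) = (u, pvRen anc.dropLast, anc.getLast!) := rfl
        simp only [List.map_cons, hitem]
        rw [List.cons_append, pvRunB_succ cm g st u (pvRen anc.dropLast) anc.getLast!]
        by_cases hv : u ∈ st.2
        · -- already visited: both sides skip the call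
          rw [if_pos ((pvContains_iff st.2 u).mpr hv)]
          have hL1 : more.length ≤ L - 1 := by simp at hL; omega
          have hL0 : L - 1 < L := by simp at hL; omega
          obtain ⟨fB', heq, hphi'⟩ := ihL (L - 1) hL0 more st rest g hc hL1
            (fun fc hfc => hinv fc (List.mem_cons_of_mem _ hfc))
            (by unfold pvPhi at hphi ⊢; simp at hphi ⊢; omega)
          refine ⟨fB', ?_, ?_⟩
          · rw [heq, pvFoldA_cons]
            simp only [pvRecA_succ, if_pos ((pvContains_iff st.2 u).mpr hv)]
          · rw [pvFoldA_cons]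
            simp only [pvRecA_succ, if_pos ((pvContains_iff st.2 u).mpr hv)]
            exact hphi'
        · -- first visit: A recurses into the children, B pushes their stack entries
          rw [if_neg (by simp [PySem.Set.contains]; exact hv)]
          set children := cm.getD u [] with hch
          set st1 : PvSt := (st.1.insert u (pvPrefixOfAnc anc), PySem.Set.add st.2 u) with hst1
          set childCalls : List (Nat × String × List Bool) :=
            (PySem.List.enumerate children).map
              (fun ic => (fA', ic.2, anc ++ [decide (ic.1 = (children.length : Int) - 1)]))
            with hcc
          have hBst1 : (st.1.insert u (pvRen anc.dropLast ++ (if anc.getLast! then "└─ " else "├─ ")),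
              PySem.Set.add st.2 u) = st1 := by
            rw [hst1, pvPrefix_eq anc hanc]
          have hpush : pvPushB cm u (pvRen anc.dropLast ++ (if anc.getLast! then "   " else "│  "))
              = childCalls.map (fun fc => pvItem fc.2) := by
            rw [← pvRen_eq anc hanc, hcc, pvPushB, List.map_map]
            exact List.map_congr_left (fun jc _ => (pvItem_concat jc.2 anc _).symm)
          have hrecA : pvRecA cm (fA' + 1) st u anc = pvFoldA cm st1 childCalls := by
            rw [pvRecA_succ, if_neg (by simp [PySem.Set.contains]; exact hv), hcc, pvFoldA,
              List.foldl_map]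
          -- counting: u is a fresh element of U
          have huUV : u ∈ U \ pvVisF st := by
            rw [Finset.mem_sdiff]
            exact ⟨huU, by simp [pvVisF, List.mem_toFinset]; exact hv⟩
          have hvis1 : pvVisF st1 = insert u (pvVisF st) := by
            rw [hst1]
            show (PySem.Set.add st.2 u).toFinset = _
            rw [PySem.Set.add_of_not_mem hv]
            simp [pvVisF, List.toFinset_append]
          have hcard1 : 1 ≤ (U \ pvVisF st).card := Finset.card_pos.mpr ⟨u, huUV⟩
          have hcard : (U \ pvVisF st1).card + 1 = (U \ pvVisF st).card := by
            rw [hvis1, Finset.sdiff_insert, Finset.card_erase_of_mem huUV]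
            omega
          have hsum : children.length + (U \ pvVisF st1).sum (fun x => (cm.getD x []).length)
              = (U \ pvVisF st).sum (fun x => (cm.getD x []).length) := by
            rw [hvis1, Finset.sdiff_insert, hch]
            exact Finset.add_sum_erase (U \ pvVisF st) (fun x => (cm.getD x []).length) huUV
          have hclen : childCalls.length = children.length := by
            rw [hcc]; simp [PySem.List.length_enumerate]
          obtain ⟨fB', heq, hphi'⟩ := ihc ((U \ pvVisF st).card - 1) (by omega)
            ((childCalls ++ more).length) (childCalls ++ more) st1 rest g
            (by omega) le_rfl
            (by
              intro fc hfc
              rcases List.mem_append.mp hfc with hfc | hfc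
              · rw [hcc] at hfc
                obtain ⟨ic, hic, rfl⟩ := List.mem_map.mp hfc
                refine ⟨HU u ic.2 (by rw [← hch]; exact pvMem_enumerate hic), by simp, ?_⟩
                omega
              · obtain ⟨h1, h2, h3⟩ := hinv fc (List.mem_cons_of_mem _ hfc)
                exact ⟨h1, h2, by omega⟩)
            (by
              unfold pvPhi at hphi ⊢
              simp only [List.map_append, List.length_append, List.length_map,
                List.length_cons] at hphi ⊢
              rw [hclen] at *
              omega)
          refine ⟨fB', ?_, ?_⟩
          · rw [hBst1, hpush, ← List.append_assoc, ← List.map_append, heq, pvFoldA_cons]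
            simp only
            rw [hrecA, ← pvFoldA_append]
          · rw [pvFoldA_cons]
            simp only
            rw [hrecA, ← pvFoldA_append]
            exact hphi'

-- preprocessing bookkeeping -------------------------------------------------

-- the truthy uris of the posts
def pvUris (posts : List (List (String × String))) : List String :=
  posts.filterMap (fun p => pvTruthy (pvGet p "uri"))

lemma pvUriToPost_keys_aux (posts : List (List (String × String))) :
    ∀ (d : PySem.Dict String (List (String × String))) (k : String),
      (posts.foldl (fun d p =>
        match pvTruthy (pvGet p "uri") with
        | some u => d.insert u p
        | none => d) d).contains k = true →
      d.contains k = true ∨ k ∈ pvUris posts := by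
  induction posts with
  | nil => intro d k h; exact Or.inl h
  | cons p ps ih =>
    intro d k h
    simp only [List.foldl_cons] at h
    cases hu : pvTruthy (pvGet p "uri") with
    | none =>
      rw [hu] at h
      rcases ih d k h with h' | h'
      · exact Or.inl h'
      · right; simp [pvUris, hu]; simpa [pvUris] using h'
    | some u =>
      rw [hu] at h
      rcases ih _ k h with h' | h'
      · rw [PySem.Dict.contains_insert] at h'
        rcases Bool.or_eq_true_iff.mp h' with h'' | h''
        · right; simp [pvUris, hu]
          exact Or.inl (by simpa using h'')
        · exact Or.inl h''
      · right; simp [pvUris, hu]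
        right; simpa [pvUris] using h'

lemma pvUriToPost_keys (posts : List (List (String × String))) (k : String)
    (h : (pvUriToPost posts).contains k = true) : k ∈ pvUris posts := by
  rcases pvUriToPost_keys_aux posts PySem.Dict.empty k h with h' | h'
  · rw [PySem.Dict.contains_empty] at h'; exact absurd h' (by simp)
  · exact h'

-- one step of the pvBuild fold
def pvBuildStep (utp : PySem.Dict String (List (String × String)))
    (acc : PySem.Dict String (List String) × List String) (p : List (String × String)) :
    PySem.Dict String (List String) × List String :=
  match pvTruthy (pvGet p "uri") with
  | none => acc
  | some u =>
    match pvTruthy (pvGet p "parent_uri") with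
    | none => (acc.1, acc.2 ++ [u])
    | some pu =>
      if utp.contains pu then (acc.1.modify pu [] (· ++ [u]), acc.2)
      else (acc.1, acc.2 ++ [u])

lemma pvBuild_eq_foldl (posts : List (List (String × String)))
    (utp : PySem.Dict String (List (String × String))) :
    pvBuild posts utp = posts.foldl (pvBuildStep utp) (PySem.Dict.empty, []) := rfl

lemma pvBuild_mem_aux (utp : PySem.Dict String (List (String × String)))
    (posts : List (List (String × String))) :
    ∀ (acc : PySem.Dict String (List String) × List String) (k u : String),
      (u ∈ (posts.foldl (pvBuildStep utp) acc).1.getD k [] →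
        u ∈ acc.1.getD k [] ∨ u ∈ pvUris posts) ∧
      (u ∈ (posts.foldl (pvBuildStep utp) acc).2 →
        u ∈ acc.2 ∨ u ∈ pvUris posts) := by
  induction posts with
  | nil => intro acc k u; exact ⟨Or.inl, Or.inl⟩
  | cons p ps ih =>
    intro acc k u
    simp only [List.foldl_cons]
    have hcons : ∀ v : String, v ∈ pvUris ps → v ∈ pvUris (p :: ps) := by
      intro v hv; simp [pvUris]
      cases hu : pvTruthy (pvGet p "uri") <;> simp <;> simp [pvUris] at hv ⊢
      · exact hv
      · exact Or.inr hv
    have hhead : ∀ u', pvTruthy (pvGet p "uri") = some u' → u' ∈ pvUris (p :: ps) := by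
      intro u' hu; simp [pvUris, hu]
    constructor
    · intro h
      rcases (ih (pvBuildStep utp acc p) k u).1 h with h' | h'
      swap
      · exact Or.inr (hcons _ h')
      · unfold pvBuildStep at h'
        cases hu : pvTruthy (pvGet p "uri") with
        | none => rw [hu] at h'; exact Or.inl h'
        | some u' =>
          rw [hu] at h'
          cases hp : pvTruthy (pvGet p "parent_uri") with
          | none => rw [hp] at h'; exact Or.inl h'
          | some pu =>
            rw [hp] at h'
            by_cases hc : utp.contains pu = true
            · simp only [hc, if_true] at h'
              rw [PySem.Dict.getD_modify] at h'
              by_cases hk : k = pu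
              · rw [if_pos hk] at h'
                subst hk
                rcases List.mem_append.mp h' with h'' | h''
                · exact Or.inl h''
                · simp at h''; subst h''; exact Or.inr (hhead _ hu)
              · rw [if_neg hk] at h'; exact Or.inl h'
            · simp only [hc] at h'; exact Or.inl h'
    · intro h
      rcases (ih (pvBuildStep utp acc p) k u).2 h with h' | h'
      swap
      · exact Or.inr (hcons _ h')
      · unfold pvBuildStep at h'
        cases hu : pvTruthy (pvGet p "uri") with
        | none => rw [hu] at h'; exact Or.inl h'
        | some u' =>
          rw [hu] at h'
          cases hp : pvTruthy (pvGet p "parent_uri") with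
          | none =>
            rw [hp] at h'
            rcases List.mem_append.mp h' with h'' | h''
            · exact Or.inl h''
            · simp at h''; subst h''; exact Or.inr (hhead _ hu)
          | some pu =>
            rw [hp] at h'
            by_cases hc : utp.contains pu = true
            · simp only [hc, if_true] at h'; exact Or.inl h'
            · simp only [hc] at h'
              rcases List.mem_append.mp h' with h'' | h''
              · exact Or.inl h''
              · simp at h''; subst h''; exact Or.inr (hhead _ hu)

lemma pvBuild_children_mem (posts : List (List (String × String)))
    (utp : PySem.Dict String (List (String × String))) (k u : String)
    (h : u ∈ (pvBuild posts utp).1.getD k []) : u ∈ pvUris posts := by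
  rw [pvBuild_eq_foldl] at h
  rcases (pvBuild_mem_aux utp posts _ k u).1 h with h' | h'
  · rw [PySem.Dict.getD_empty] at h'; cases h'
  · exact h'

lemma pvBuild_roots_mem (posts : List (List (String × String)))
    (utp : PySem.Dict String (List (String × String))) (u : String)
    (h : u ∈ (pvBuild posts utp).2) : u ∈ pvUris posts := by
  rw [pvBuild_eq_foldl] at h
  rcases (pvBuild_mem_aux utp posts _ "" u).2 h with h' | h'
  · cases h'
  · exact h'

lemma pvSum_modify (S : Finset String) (cm : PySem.Dict String (List String))
    (pu u' : String) (hpu : pu ∈ S) :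
    S.sum (fun x => ((cm.modify pu [] (· ++ [u'])).getD x []).length)
      = S.sum (fun x => (cm.getD x []).length) + 1 := by
  have : ∀ x ∈ S, ((cm.modify pu [] (· ++ [u'])).getD x []).length
      = (cm.getD x []).length + (if x = pu then 1 else 0) := by
    intro x _
    rw [PySem.Dict.getD_modify]
    by_cases hx : x = pu <;> simp [hx]
  rw [Finset.sum_congr rfl this, Finset.sum_add_distrib, Finset.sum_ite_eq' S pu (fun _ => 1),
    if_pos hpu]

lemma pvBuild_bound_aux (utp : PySem.Dict String (List (String × String)))
    (S : Finset String) (hS : ∀ k, utp.contains k = true → k ∈ S)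
    (posts : List (List (String × String))) :
    ∀ (acc : PySem.Dict String (List String) × List String),
      (posts.foldl (pvBuildStep utp) acc).2.length +
        S.sum (fun x => ((posts.foldl (pvBuildStep utp) acc).1.getD x []).length)
      ≤ acc.2.length + S.sum (fun x => (acc.1.getD x []).length) + (pvUris posts).length := by
  induction posts with
  | nil => intro acc; simp [pvUris]
  | cons p ps ih =>
    intro acc
    simp only [List.foldl_cons]
    have h1 := ih (pvBuildStep utp acc p)
    have hstep : (pvBuildStep utp acc p).2.length +
        S.sum (fun x => ((pvBuildStep utp acc p).1.getD x []).length)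
        ≤ acc.2.length + S.sum (fun x => (acc.1.getD x []).length) +
          (if (pvTruthy (pvGet p "uri")).isSome then 1 else 0) := by
      unfold pvBuildStep
      cases hu : pvTruthy (pvGet p "uri") with
      | none => simp
      | some u' =>
        simp only [Option.isSome_some, if_true]
        cases hp : pvTruthy (pvGet p "parent_uri") with
        | none => simp; omega
        | some pu =>
          by_cases hc : utp.contains pu = true
          · simp only [hc, if_true]
            rw [pvSum_modify S acc.1 pu u' (hS pu hc)]
            omega
          · simp only [hc]; simp; omega
    have hlen : (pvUris (p :: ps)).length
        = (if (pvTruthy (pvGet p "uri")).isSome then 1 else 0) + (pvUris ps).length := by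
      simp only [pvUris, List.filterMap_cons]
      cases hu : pvTruthy (pvGet p "uri")
      · simp
      · simp; omega
    omega

lemma pvBuild_bound (posts : List (List (String × String))) :
    (pvBuild posts (pvUriToPost posts)).2.length +
      ((pvUris posts).toFinset).sum
        (fun u => ((pvBuild posts (pvUriToPost posts)).1.getD u []).length)
      ≤ posts.length := by
  have hS : ∀ k, (pvUriToPost posts).contains k = true → k ∈ (pvUris posts).toFinset := by
    intro k hk; rw [List.mem_toFinset]; exact pvUriToPost_keys posts k hk
  have := pvBuild_bound_aux (pvUriToPost posts) (pvUris posts).toFinset hS posts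
    (PySem.Dict.empty, [])
  rw [pvBuild_eq_foldl]
  have hz : ((pvUris posts).toFinset).sum
      (fun x => ((PySem.Dict.empty : PySem.Dict String (List String)).getD x []).length) = 0 := by
    apply Finset.sum_eq_zero; intro x _; rw [PySem.Dict.getD_empty]; rfl
  have hlen : (pvUris posts).length ≤ posts.length := List.length_filterMap_le _ _
  simp only [hz, List.length_nil] at this
  omega

lemma pvItem_singleton (u : String) (b : Bool) : pvItem (u, [b]) = (u, "", b) := by
  have : ([b] : List Bool) = [] ++ [b] := rfl
  rw [this, pvItem_concat]
  rfl

-- running the whole machine from the entries of a list of calls computes the fold of the calls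
lemma pvSIM_top (cm : PySem.Dict String (List String)) (U : Finset String)
    (HU : ∀ k u, u ∈ cm.getD k [] → u ∈ U)
    (fcalls : List (Nat × String × List Bool)) (st : PvSt) (fB : Nat)
    (hinv : ∀ fc ∈ fcalls, fc.2.1 ∈ U ∧ fc.2.2 ≠ [] ∧ (U \ pvVisF st).card + 1 ≤ fc.1)
    (hphi : pvPhi cm U st (fcalls.map (fun fc => pvItem fc.2)) ≤ fB) :
    pvRunB cm fB st (fcalls.map (fun fc => pvItem fc.2)) = pvFoldA cm st fcalls := by
  obtain ⟨fB', heq, -⟩ := pvSIM cm U HU ((U \ pvVisF st).card) fcalls.length fcalls st [] fB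
    le_rfl le_rfl hinv (by simpa using hphi)
  rw [← pvRunB_nil cm fB' (pvFoldA cm st fcalls), ← heq]
  simp

-- ===== VERDICT (by name: the statement is the Claim_ definition above) =====
theorem compute_tree_prefixes_spec : Claim_equal_compute_tree_prefixes := by
  intro posts _
  unfold Spec_compute_tree_prefixes compute_tree_prefixes compute_tree_prefixes_alt
  by_cases hemp : posts.isEmpty
  · simp [hemp]
  · simp only [hemp, Bool.false_eq_true, if_false]
    set utp := pvUriToPost posts with hutp
    set cm := (pvBuild posts utp).1 with hcm
    set roots := (pvBuild posts utp).2 with hroots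
    set U : Finset String := (pvUris posts).toFinset with hU
    have HU : ∀ k u, u ∈ cm.getD k [] → u ∈ U := fun k u h =>
      List.mem_toFinset.mpr (pvBuild_children_mem posts utp k u h)
    have HR : ∀ u ∈ roots, u ∈ U := fun u h =>
      List.mem_toFinset.mpr (pvBuild_roots_mem posts utp u h)
    have hUcard : U.card ≤ posts.length :=
      le_trans (List.toFinset_card_le _) (List.length_filterMap_le _ _)
    have hbound : roots.length + U.sum (fun u => (cm.getD u []).length) ≤ posts.length :=
      pvBuild_bound posts
    by_cases hr : roots.length = 1
    · -- single root
      obtain ⟨r, hrts⟩ := List.length_eq_one_iff.mp hr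
      have hrU : r ∈ U := HR r (by rw [hrts]; exact List.mem_cons_self)
      set N := posts.length + 1 with hN
      set st' : PvSt := (PySem.Dict.empty.insert r "", PySem.Set.empty) with hst'
      set children := cm.getD r [] with hch
      set callsC : List (Nat × String × List Bool) :=
        (PySem.List.enumerate children).map
          (fun jc => (N, jc.2, [decide (jc.1 = (children.length : Int) - 1)])) with hcalls
      have hchlen : children.length ≤ U.sum (fun u => (cm.getD u []).length) := by
        have := Finset.single_le_sum (f := fun u => (cm.getD u []).length)
          (fun i _ => Nat.zero_le _) hrU
        simpa [← hch] using this
      have hA : (PySem.List.enumerate roots).foldl (fun (st : PvSt) ir =>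
          if roots.length = 1 then
            (PySem.List.enumerate (cm.getD ir.2 [])).foldl
              (fun st2 jc => pvRecA cm N st2 jc.2
                [decide (jc.1 = ((cm.getD ir.2 []).length : Int) - 1)])
              (st.1.insert ir.2 "", st.2)
          else pvRecA cm N st ir.2 [decide (ir.1 = (roots.length : Int) - 1)])
          ((PySem.Dict.empty, PySem.Set.empty) : PvSt) = pvFoldA cm st' callsC := by
        rw [hrts]
        rw [show PySem.List.enumerate [r] = [((0 : Int), r)] from rfl]
        rw [List.foldl_cons, List.foldl_nil]
        rw [if_pos (show ([r] : List String).length = 1 from rfl)]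
        rw [hcalls, pvFoldA, List.foldl_map]
      have hstack : pvPushB cm r "" = callsC.map (fun fc => pvItem fc.2) := by
        rw [hcalls, pvPushB, List.map_map, ← hch]
        exact (List.map_congr_left (fun jc _ => pvItem_singleton jc.2 _)).symm
      have hrun : pvRunB cm (2 * posts.length + 1) st' (pvPushB cm r "")
          = pvFoldA cm st' callsC := by
        rw [hstack]
        apply pvSIM_top cm U HU
        · intro fc hfc
          rw [hcalls] at hfc
          obtain ⟨jc, hjc, rfl⟩ := List.mem_map.mp hfc
          refine ⟨HU r jc.2 (by rw [← hch]; exact pvMem_enumerate hjc), by simp, ?_⟩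
          have : (U \ pvVisF st').card ≤ U.card := Finset.card_le_card Finset.sdiff_subset
          simp only [hN]
          omega
        · unfold pvPhi
          have hvis : pvVisF st' = ∅ := rfl
          rw [hvis, Finset.sdiff_empty]
          simp only [List.length_map, hcalls, PySem.List.length_enumerate]
          omega
      rw [hA, if_pos hr, ← hrun, hrts]
      rfl
    · -- zero or several roots
      set N := posts.length + 1 with hN
      set st0 : PvSt := (PySem.Dict.empty, PySem.Set.empty) with hst0
      set topCalls : List (Nat × String × List Bool) :=
        (PySem.List.enumerate roots).map
          (fun ir => (N, ir.2, [decide (ir.1 = (roots.length : Int) - 1)])) with htop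
      have hA : (PySem.List.enumerate roots).foldl (fun (st : PvSt) ir =>
          if roots.length = 1 then
            (PySem.List.enumerate (cm.getD ir.2 [])).foldl
              (fun st2 jc => pvRecA cm N st2 jc.2
                [decide (jc.1 = ((cm.getD ir.2 []).length : Int) - 1)])
              (st.1.insert ir.2 "", st.2)
          else pvRecA cm N st ir.2 [decide (ir.1 = (roots.length : Int) - 1)])
          st0 = pvFoldA cm st0 topCalls := by
        simp only [hr, if_false]
        rw [htop, pvFoldA, List.foldl_map]
      have hstack : (PySem.List.enumerate roots).map
          (fun ir => (ir.2, "", decide (ir.1 = (roots.length : Int) - 1)))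
          = topCalls.map (fun fc => pvItem fc.2) := by
        rw [htop, List.map_map]
        exact (List.map_congr_left (fun ir _ => pvItem_singleton ir.2 _)).symm
      have hrun : pvRunB cm (2 * posts.length + 1) st0
          ((PySem.List.enumerate roots).map
            (fun ir => (ir.2, "", decide (ir.1 = (roots.length : Int) - 1))))
          = pvFoldA cm st0 topCalls := by
        rw [hstack]
        apply pvSIM_top cm U HU
        · intro fc hfc
          rw [htop] at hfc
          obtain ⟨ir, hir, rfl⟩ := List.mem_map.mp hfc
          refine ⟨HR ir.2 (pvMem_enumerate hir), by simp, ?_⟩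
          have : (U \ pvVisF st0).card ≤ U.card := Finset.card_le_card Finset.sdiff_subset
          simp only [hN]
          omega
        · unfold pvPhi
          have hvis : pvVisF st0 = ∅ := rfl
          rw [hvis, Finset.sdiff_empty]
          simp only [List.length_map, htop, PySem.List.length_enumerate]
          omega
      rw [hA, if_neg hr, ← hrun]
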